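-- pv_equiv track=rewrite | github.com/minarth/advent-of-code | 2016/22/main.py | part_one
-- ===== SOURCE A (Python) =====
-- def part_one(nodes):
--     viable_pairs = 0
--     unmovable = set()
--     for i, n1 in enumerate(nodes):
--         _, _, _, used, _, _ = n1
--         moved = 0
--         for j, n2 in enumerate(nodes):
--             if i == j: continue
--             _, _, _, _, avail, _ = n2
--             if used <= avail and used > 0:
--                 viable_pairs += 1
--                 moved += 1
--             elif used == 0:
--                 moved += 1
--         if moved == 0:
--             unmovable.add((n1[0], n1[1]))
--
--     return viable_pairs, unmovable
-- ===== SOURCE B (Python) =====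
-- def _bisect_left(a, x):
--     # standard bisect_left (stdlib bisect is not imported by the original module)
--     lo, hi = 0, len(a)
--     while lo < hi:
--         mid = (lo + hi) // 2
--         if a[mid] < x:
--             lo = mid + 1
--         else:
--             hi = mid
--     return lo
--
--
-- def part_one(nodes):
--     avails = sorted(node[4] for node in nodes)
--     n = len(nodes)
--     viable_pairs = 0
--     unmovable = set()
--     for x, y, _, used, avail, _ in nodes:
--         if used > 0:
--             # other nodes whose available space fits this node's data
--             hosts = n - _bisect_left(avails, used) - (used <= avail)
--             viable_pairs += hosts
--         else:
--             # a node with no data fits on any other node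
--             hosts = n - 1 if used == 0 else 0
--         if hosts == 0:
--             unmovable.add((x, y))
--     return viable_pairs, unmovable
-- ===== Notes on version B (the rewrite author's own statement) =====
-- stated objective: faster
-- what changed: A's O(n^2) nested scan over all node pairs is replaced by sorting the avail values once and answering each node's 'how many other nodes can host my data' query with a binary search plus a self-adjustment, in a single pass.
import Mathlib
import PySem

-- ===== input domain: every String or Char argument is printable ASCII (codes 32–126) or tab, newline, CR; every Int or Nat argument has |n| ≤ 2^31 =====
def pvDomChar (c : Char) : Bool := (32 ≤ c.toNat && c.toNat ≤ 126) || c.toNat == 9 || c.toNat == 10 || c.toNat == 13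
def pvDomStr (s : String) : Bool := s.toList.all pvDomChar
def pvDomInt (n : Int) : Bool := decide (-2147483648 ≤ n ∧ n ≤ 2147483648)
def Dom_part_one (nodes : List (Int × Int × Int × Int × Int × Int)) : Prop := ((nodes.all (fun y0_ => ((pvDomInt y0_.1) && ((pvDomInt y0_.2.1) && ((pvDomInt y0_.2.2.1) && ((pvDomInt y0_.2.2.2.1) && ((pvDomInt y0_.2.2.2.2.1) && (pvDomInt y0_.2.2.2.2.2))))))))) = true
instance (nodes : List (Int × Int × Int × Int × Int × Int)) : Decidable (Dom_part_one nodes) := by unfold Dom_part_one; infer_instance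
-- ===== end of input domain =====

-- B replaces A's O(n^2) nested scan by one sorted avail list plus a binary search per node (O(n log n)).

-- ===== PORT A =====
-- inner loop body: for j, n2 in enumerate(nodes): if i == j: continue; …
def pvInnerBody (i used : Int) (s : Int × Int) (q : Int × (Int × Int × Int × Int × Int × Int)) : Int × Int :=
  if i = q.1 then s
  else
    let avail := q.2.2.2.2.2.1
    if used ≤ avail ∧ 0 < used then (s.1 + 1, s.2 + 1)
    else if used = 0 then (s.1, s.2 + 1)
    else s

-- outer loop body: for i, n1 in enumerate(nodes): …
def pvOuterBody (nodes : List (Int × Int × Int × Int × Int × Int))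
    (st : Int × PySem.Set (Int × Int)) (p : Int × (Int × Int × Int × Int × Int × Int)) :
    Int × PySem.Set (Int × Int) :=
  let i := p.1
  let n1 := p.2
  let used := n1.2.2.2.1
  let inner := (PySem.List.enumerate nodes).foldl (pvInnerBody i used) (st.1, (0 : Int))
  if inner.2 = 0 then (inner.1, st.2.add (n1.1, n1.2.1))
  else (inner.1, st.2)

def part_one (nodes : List (Int × Int × Int × Int × Int × Int)) : Int × (List (Int × Int)) :=
  (PySem.List.enumerate nodes).foldl (pvOuterBody nodes) ((0 : Int), PySem.Set.ofList [])

-- ===== PORT B =====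
-- loop body of Source B's single pass (avails = sorted avail values, n = len(nodes));
-- Source B's hand-written standard bisect_left loop is PySem.List.bisectLeft (the same lo/hi loop).
def pvAltBody (avails : List Int) (n : Int)
    (st : Int × PySem.Set (Int × Int)) (n1 : Int × Int × Int × Int × Int × Int) :
    Int × PySem.Set (Int × Int) :=
  let used := n1.2.2.2.1
  let avail := n1.2.2.2.2.1
  -- (viable_pairs, hosts) after the if/else
  let res : Int × Int :=
    if 0 < used then
      let hosts : Int := n - (PySem.List.bisectLeft avails used : Int)
        - (if used ≤ avail then 1 else 0)
      (st.1 + hosts, hosts)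
    else
      (st.1, if used = 0 then n - 1 else 0)
  if res.2 = 0 then (res.1, st.2.add (n1.1, n1.2.1)) else (res.1, st.2)

def part_one_alt (nodes : List (Int × Int × Int × Int × Int × Int)) : Int × (List (Int × Int)) :=
  let avails := PySem.List.sorted (nodes.map (fun n => n.2.2.2.2.1)) (fun x => x)
  let n : Int := nodes.length
  nodes.foldl (pvAltBody avails n) ((0 : Int), PySem.Set.ofList [])

-- ===== PRECONDITION & SPEC =====
def Spec_part_one (nodes : List (Int × Int × Int × Int × Int × Int)) (out : Int × (List (Int × Int))) : Prop := out = part_one_alt nodes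
instance (nodes : List (Int × Int × Int × Int × Int × Int)) (out : Int × (List (Int × Int))) : Decidable (Spec_part_one nodes out) := by unfold Spec_part_one; infer_instance

-- ===== CLAIM (what is proved, stated in full; the proofs are below) =====
def Claim_equal_part_one : Prop := ∀ (nodes : List (Int × Int × Int × Int × Int × Int)), Dom_part_one nodes → Spec_part_one nodes (part_one nodes)

-- ===== LEMMAS AND PROOFS =====

-- predicates counted by A's inner loop (for a node with usage `u`)
def pvPA (u : Int) (n2 : Int × Int × Int × Int × Int × Int) : Bool :=
  decide (u ≤ n2.2.2.2.2.1 ∧ 0 < u)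
def pvPM (u : Int) (n2 : Int × Int × Int × Int × Int × Int) : Bool :=
  pvPA u n2 || decide (u = 0)

-- the inner loop over an index segment that never hits i just counts pvPA / pvPM
lemma pv_inner_seg (i u : Int) (L : List (Int × Int × Int × Int × Int × Int)) (k : Int)
    (h : ∀ q ∈ PySem.List.enumerate L k, i ≠ q.1) (s : Int × Int) :
    (PySem.List.enumerate L k).foldl (pvInnerBody i u) s
      = (s.1 + (L.countP (pvPA u) : Int), s.2 + (L.countP (pvPM u) : Int)) := by
  induction L generalizing k s with
  | nil => simp [PySem.List.enumerate_nil]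
  | cons x L ih =>
    rw [PySem.List.enumerate_cons]
    have hik : i ≠ k := by
      have := h (k, x) (by rw [PySem.List.enumerate_cons]; exact List.mem_cons_self)
      simpa using this
    have hrest : ∀ q ∈ PySem.List.enumerate L (k + 1), i ≠ q.1 := by
      intro q hq
      exact h q (by rw [PySem.List.enumerate_cons]; exact List.mem_cons_of_mem _ hq)
    simp only [List.foldl_cons]
    rw [ih (k + 1) hrest]
    simp only [pvInnerBody, hik]
    by_cases h1 : u ≤ x.2.2.2.2.1 ∧ 0 < u
    · have hpa : pvPA u x = true := by simp [pvPA, h1.1, h1.2]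
      have hpm : pvPM u x = true := by simp [pvPM, hpa]
      simp only [if_pos h1, List.countP_cons, hpa, hpm, Prod.mk.injEq]
      constructor <;> (push_cast; ring)
    · rw [if_neg h1]
      by_cases h0 : u = 0
      · have hpa : pvPA u x = false := by simp [pvPA, h0]
        have hpm : pvPM u x = true := by simp [pvPM, h0]
        simp only [if_pos h0, List.countP_cons, hpa, hpm, Prod.mk.injEq]
        constructor <;> (push_cast; ring)
      · have hpa : pvPA u x = false := by
          simp only [pvPA, decide_eq_false_iff_not]; exact h1
        have hpm : pvPM u x = false := by simp [pvPM, hpa, h0]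
        simp [if_neg h0, hpa, hpm]

-- len(l) - bisect_left(sorted l, u) counts the elements of l that are ≥ u
lemma pv_bisect_count (l : List Int) (u : Int) :
    (l.length : Int) - (PySem.List.bisectLeft (PySem.List.sorted l (fun x => x)) u : Int)
      = (l.countP (fun a => decide (u ≤ a)) : Int) := by
  set s := PySem.List.sorted l (fun x => x) with hs
  have hperm : s.Perm l := PySem.List.sorted_perm l (fun x => x) false
  have hsorted : s.Pairwise (fun a b => a ≤ b) := PySem.List.sorted_pairwise l (fun x => x)
  obtain ⟨hle, hlt, hge⟩ := PySem.List.bisectLeft_spec s u hsorted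
  set r := PySem.List.bisectLeft s u with hr
  have hlen : s.length = l.length := hperm.length_eq
  have hcount : l.countP (fun a => decide (u ≤ a)) = s.countP (fun a => decide (u ≤ a)) :=
    (hperm.countP_eq _).symm
  have hsplit : s.countP (fun a => decide (u ≤ a)) = s.length - r := by
    have htake : (s.take r).countP (fun a => decide (u ≤ a)) = 0 := by
      rw [List.countP_eq_zero]
      intro a ha
      obtain ⟨j, hj, rfl⟩ := List.mem_iff_getElem.mp ha
      have hj' : j < r := lt_of_lt_of_le hj (by simp)
      have hjs : j < s.length := lt_of_lt_of_le hj' hle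
      rw [List.getElem_take]
      simpa using not_le.mpr (hlt j hjs hj')
    have hdrop : (s.drop r).countP (fun a => decide (u ≤ a)) = (s.drop r).length := by
      rw [List.countP_eq_length]
      intro a ha
      obtain ⟨j, hj, rfl⟩ := List.mem_iff_getElem.mp ha
      have hdl : (s.drop r).length = s.length - r := List.length_drop
      rw [List.getElem_drop]
      have := hge (r + j) (by omega) (by omega)
      simpa using this
    calc s.countP (fun a => decide (u ≤ a))
        = (s.take r ++ s.drop r).countP (fun a => decide (u ≤ a)) := by rw [List.take_append_drop]
      _ = (s.take r).countP _ + (s.drop r).countP _ := List.countP_append ..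
      _ = s.length - r := by rw [htake, hdrop]; simp
  rw [hcount, hsplit, ← hlen]
  omega

-- one outer step of A at index |xs| equals one step of B, given the split nodes = xs ++ n1 :: ys
lemma pv_step (xs ys : List (Int × Int × Int × Int × Int × Int))
    (n1 : Int × Int × Int × Int × Int × Int) (st : Int × PySem.Set (Int × Int)) :
    pvOuterBody (xs ++ n1 :: ys) st ((xs.length : Int), n1)
      = pvAltBody (PySem.List.sorted ((xs ++ n1 :: ys).map (fun n => n.2.2.2.2.1)) (fun x => x))
          ((xs ++ n1 :: ys).length : Int) st n1 := by
  set nodes := xs ++ n1 :: ys with hnodes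
  set u := n1.2.2.2.1 with hu
  have hxs : ∀ q ∈ PySem.List.enumerate xs 0, (xs.length : Int) ≠ q.1 := by
    intro q hq
    obtain ⟨k, hk, rfl⟩ := (PySem.List.mem_enumerate_iff _ _ _).mp hq
    simp only []
    omega
  have hys : ∀ q ∈ PySem.List.enumerate ys ((xs.length : Int) + 1), (xs.length : Int) ≠ q.1 := by
    intro q hq
    obtain ⟨k, hk, rfl⟩ := (PySem.List.mem_enumerate_iff _ _ _).mp hq
    simp only []
    omega
  have hmid : ∀ s : Int × Int, pvInnerBody (xs.length : Int) u s ((xs.length : Int), n1) = s := by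
    intro s; simp [pvInnerBody]
  have hinner : (PySem.List.enumerate nodes 0).foldl (pvInnerBody (xs.length : Int) u) (st.1, (0 : Int))
      = (st.1 + (xs.countP (pvPA u) : Int) + (ys.countP (pvPA u) : Int),
         (0 : Int) + (xs.countP (pvPM u) : Int) + (ys.countP (pvPM u) : Int)) := by
    rw [hnodes, PySem.List.enumerate_append, PySem.List.enumerate_cons, List.foldl_append,
      pv_inner_seg _ _ _ _ hxs]
    simp only [zero_add]
    rw [List.foldl_cons, hmid, pv_inner_seg _ _ _ _ hys]
  have hbis : ((nodes.length : Int)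
        - (PySem.List.bisectLeft (PySem.List.sorted (nodes.map (fun n => n.2.2.2.2.1)) (fun x => x)) u : Int))
      = (nodes.countP (fun n => decide (u ≤ n.2.2.2.2.1)) : Int) := by
    have := pv_bisect_count (nodes.map (fun n => n.2.2.2.2.1)) u
    rwa [List.length_map, List.countP_map] at this
  have hlen : nodes.length = xs.length + ys.length + 1 := by rw [hnodes]; simp; omega
  unfold pvOuterBody pvAltBody
  simp only [← hu, hinner]
  by_cases hpos : 0 < u
  · have hAeq : nodes.countP (fun n => decide (u ≤ n.2.2.2.2.1)) = nodes.countP (pvPA u) := by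
      apply List.countP_congr; intro a _; simp [pvPA, hpos]
    have hMeq : ∀ L : List (Int × Int × Int × Int × Int × Int),
        L.countP (pvPM u) = L.countP (pvPA u) := by
      intro L; apply List.countP_congr; intro a _
      have : u ≠ 0 := by omega
      simp [pvPM, this]
    have hself : pvPA u n1 = decide (u ≤ n1.2.2.2.2.1) := by
      simp [pvPA, hpos]
    have hsplit : nodes.countP (pvPA u)
        = xs.countP (pvPA u) + (if u ≤ n1.2.2.2.2.1 then 1 else 0) + ys.countP (pvPA u) := by
      rw [hnodes, List.countP_append, List.countP_cons, hself]
      by_cases hav : u ≤ n1.2.2.2.2.1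
      · simp [hav]; ring
      · simp [hav]
    rw [if_pos hpos]
    simp only [hbis, hAeq, hsplit, hMeq]
    split_ifs with h1 h2 h3 h2 h3 <;>
      first
        | (exfalso; push_cast at *; omega)
        | (simp only [Prod.mk.injEq, and_true]; push_cast; omega)
  · rw [if_neg hpos]
    by_cases hz : u = 0
    · have hM : ∀ L : List (Int × Int × Int × Int × Int × Int),
          L.countP (pvPM u) = L.length := by
        intro L; apply List.countP_eq_length.mpr; intro a _; simp [pvPM, hz]
      have hA : ∀ L : List (Int × Int × Int × Int × Int × Int),
          L.countP (pvPA u) = 0 := by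
        intro L; apply List.countP_eq_zero.mpr; intro a _; simp [pvPA, hz]
      rw [if_pos hz, hA, hA, hM, hM]
      split_ifs with h1 h2 h2 <;>
        first
          | (exfalso; omega)
          | (apply Prod.ext <;> simp)
    · have hM : ∀ L : List (Int × Int × Int × Int × Int × Int),
          L.countP (pvPM u) = 0 := by
        intro L; apply List.countP_eq_zero.mpr; intro a _
        simp [pvPM, pvPA, hz]
        intro _; omega
      have hA : ∀ L : List (Int × Int × Int × Int × Int × Int),
          L.countP (pvPA u) = 0 := by
        intro L; apply List.countP_eq_zero.mpr; intro a _
        simp [pvPA]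
        intro _; omega
      rw [if_neg hz, hA, hA, hM, hM]
      simp

lemma pv_outer (nodes : List (Int × Int × Int × Int × Int × Int)) :
    ∀ (xs l : List (Int × Int × Int × Int × Int × Int)) (st : Int × PySem.Set (Int × Int)),
    nodes = xs ++ l →
    (PySem.List.enumerate l (xs.length : Int)).foldl (pvOuterBody nodes) st
      = l.foldl (pvAltBody (PySem.List.sorted (nodes.map (fun n => n.2.2.2.2.1)) (fun x => x))
          (nodes.length : Int)) st := by
  intro xs l
  induction l generalizing xs with
  | nil => intro st _; simp [PySem.List.enumerate_nil]
  | cons n1 l' ih =>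
    intro st heq
    rw [PySem.List.enumerate_cons, List.foldl_cons, List.foldl_cons]
    have hstep := pv_step xs l' n1 st
    rw [← heq] at hstep
    rw [hstep]
    have hx : ((xs.length : Int) + 1) = (((xs ++ [n1]).length : Int)) := by simp
    rw [hx]
    exact ih (xs ++ [n1]) _ (by simp [heq])

-- ===== VERDICT (by name: the statement is the Claim_ definition above) =====
theorem part_one_spec : Claim_equal_part_one := by
  intro nodes _
  show part_one nodes = part_one_alt nodes
  unfold part_one part_one_alt
  simpa using pv_outer nodes [] nodes ((0 : Int), PySem.Set.ofList []) rfl
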